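-- pv_equiv track=rewrite | github.com/monees007/Homework-Python | Week8/GrPA5.py | trending
-- ===== SOURCE A (Python) =====
-- def trending(subject_topics):
--     """
--     :param subject_topics: list of list of topics in one subject
--     :return: count_top_trending, count_least_trending
--     """
--     list0 = []
--     db = []  # list of count, and topic
--     for x in subject_topics:
--         for y in list(set(x)):
--             list0.append(y)
--     set_of_topics = set(list0)
--     for topic0 in set_of_topics:
--         db.append([list0.count(topic0), topic0])
--     highest_freq, lowest_freq = 0,9999999999999999
--     for i in db:
--         if highest_freq < i[0]:
--             highest_freq = i[0]
--         if lowest_freq > i[0]: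
--             lowest_freq = i[0]
--     count_top_trending, count_least_trending = 0, 0
--     for i in db:
--         if i[0] == highest_freq:
--             count_top_trending+=1
--         if i[0] == lowest_freq:
--             count_least_trending+=1
--     return count_top_trending,count_least_trending
-- ===== SOURCE B (Python) =====
-- def trending(subject_topics):
--     """
--     :param subject_topics: list of list of topics in one subject
--     :return: count_top_trending, count_least_trending
--     """
--     # single-pass per-topic counter (each subject counts a topic at most once)
--     counts = {}
--     for subj in subject_topics:
--         for t in set(subj):
--             counts[t] = counts.get(t, 0) + 1
--     # sort the frequencies and read the extremes off the ends: no max/min search scans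
--     freqs = sorted(counts.values())
--     if not freqs:
--         return 0, 0
--     return freqs.count(freqs[-1]), freqs.count(freqs[0])
-- ===== Notes on version B (the rewrite author's own statement) =====
-- stated objective: faster
-- what changed: Replaces A's per-distinct-topic list0.count rescans and its two explicit max/min-search-then-match-count loops with a single-pass counter dict whose values are sorted once, the extreme frequencies being read directly off the ends of the sorted list.
import Mathlib
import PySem

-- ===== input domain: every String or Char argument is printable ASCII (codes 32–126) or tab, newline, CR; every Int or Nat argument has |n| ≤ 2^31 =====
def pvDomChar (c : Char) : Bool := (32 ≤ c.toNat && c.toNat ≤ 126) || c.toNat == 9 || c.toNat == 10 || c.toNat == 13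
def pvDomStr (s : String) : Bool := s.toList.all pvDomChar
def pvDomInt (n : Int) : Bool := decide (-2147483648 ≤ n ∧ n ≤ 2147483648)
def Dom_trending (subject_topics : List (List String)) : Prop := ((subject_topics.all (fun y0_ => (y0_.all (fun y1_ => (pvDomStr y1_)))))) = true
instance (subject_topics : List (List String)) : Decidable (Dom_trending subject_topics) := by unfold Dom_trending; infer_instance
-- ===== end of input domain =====

-- B replaces A's quadratic per-topic list0.count rescans and its two max/min-search-then-count
-- scans by a single-pass counter dict whose values are sorted once, the extreme frequencies being
-- read off the ends of the sorted list (objective: faster).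

-- ===== PORT A =====
def trending (subject_topics : List (List String)) : List Int :=
  -- list0: all topics, each subject deduplicated (set iteration order immaterial: only counts are used)
  let list0 : List String :=
    subject_topics.foldl (fun acc x => acc ++ PySem.Set.ofList x) []
  let set_of_topics : PySem.Set String := PySem.Set.ofList list0
  -- db: [count, topic] pairs
  let db : List (Int × String) :=
    set_of_topics.foldl (fun acc t => acc ++ [((list0.count t : Int), t)]) []
  let hl : Int × Int :=
    db.foldl (fun (p : Int × Int) i =>
      (if p.1 < i.1 then i.1 else p.1, if i.1 < p.2 then i.1 else p.2))
      (0, 9999999999999999)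
  let cc : Int × Int :=
    db.foldl (fun (p : Int × Int) i =>
      (if i.1 = hl.1 then p.1 + 1 else p.1, if i.1 = hl.2 then p.2 + 1 else p.2))
      (0, 0)
  [cc.1, cc.2]

-- ===== PORT B =====
def trending_alt (subject_topics : List (List String)) : List Int :=
  -- per-topic frequency (each subject counts a topic at most once)
  let counts : PySem.Dict String Int :=
    subject_topics.foldl
      (fun d subj => (PySem.Set.ofList subj).foldl (fun d t => d.insert t (d.getD t 0 + 1)) d)
      PySem.Dict.empty
  -- sorted frequencies; extremes sit at the ends
  let freqs : List Int := PySem.List.sorted counts.values (fun x => x) false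
  if freqs.isEmpty then [0, 0]
  else
    -- freqs is nonempty here, so the -1 / 0 indexing is in range and the default never fires
    [(freqs.count (PySem.List.pyGetD freqs (-1) 0) : Int),
     (freqs.count (PySem.List.pyGetD freqs 0 0) : Int)]

-- ===== PRECONDITION & SPEC =====
-- Pre_ excludes only inputs with more than 9999999999999999 subjects: there every topic frequency can
-- exceed A's literal min-sentinel, which then undercounts the least-trending topics. No such input can
-- be materialised (no run of A on one can finish), so Pre_ admits every input A actually returns on.
def Pre_trending (subject_topics : List (List String)) : Prop :=
  (subject_topics.length : Int) ≤ 9999999999999999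
instance (subject_topics : List (List String)) : Decidable (Pre_trending subject_topics) := by
  unfold Pre_trending; infer_instance
def pvWitness_trending : List (List String) := [["a", "b"], ["a"]]
def Spec_trending (subject_topics : List (List String)) (out : List Int) : Prop := out = trending_alt subject_topics
instance (subject_topics : List (List String)) (out : List Int) : Decidable (Spec_trending subject_topics out) := by unfold Spec_trending; infer_instance

-- ===== CLAIM (what is proved, stated in full; the proofs are below) =====
def Claim_equal_trending : Prop := ∀ (subject_topics : List (List String)), Dom_trending subject_topics → Pre_trending subject_topics → Spec_trending subject_topics (trending subject_topics)

-- ===== LEMMAS AND PROOFS =====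

def pvL (st : List (List String)) : List String := st.flatMap (fun x => PySem.Set.ofList x)
def pvF (st : List (List String)) : List Int :=
  (PySem.Set.ofList (pvL st)).map (fun t => ((pvL st).count t : Int))

theorem if_lt_eq_max (a c : Int) : (if a < c then c else a) = max a c := by
  rcases lt_or_ge a c with h | h
  · simp [h, max_eq_right h.le]
  · simp [not_lt.2 h, max_eq_left h]

theorem if_lt_eq_min (b c : Int) : (if c < b then c else b) = min b c := by
  rcases lt_or_ge c b with h | h
  · simp [h, min_eq_right h.le]
  · simp [not_lt.2 h, min_eq_left h]

theorem count_foldl (l : List Int) (H : Int) :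
    l.foldl (fun n c => if c = H then n + 1 else n) (0 : Int) = (l.count H : Int) := by
  simpa [List.count] using PySem.List.foldl_count_if (fun c => c == H) l 0

theorem A_characterize (st : List (List String)) :
    trending st =
      [((pvF st).count ((pvF st).foldl max 0) : Int),
       ((pvF st).count ((pvF st).foldl min 9999999999999999) : Int)] := by
  have hL : st.foldl (fun acc x => acc ++ PySem.Set.ofList x) [] = pvL st := by
    simpa [pvL] using PySem.List.foldl_append_eq_flatMap (fun x => PySem.Set.ofList x) st []
  have hdb : (PySem.Set.ofList (pvL st)).foldl
      (fun acc t => acc ++ [(((pvL st).count t : Int), t)]) []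
      = (PySem.Set.ofList (pvL st)).map (fun t => (((pvL st).count t : Int), t)) := by
    simpa using PySem.List.foldl_append_singleton_eq_map
      (fun t => (((pvL st).count t : Int), t)) (PySem.Set.ofList (pvL st)) []
  have hmapfst : ((PySem.Set.ofList (pvL st)).map
      (fun t => (((pvL st).count t : Int), t))).map (·.1) = pvF st := by
    simp [pvF, List.map_map, Function.comp]
  have e1 : List.foldl (fun (a : Int) (i : Int × String) => max a i.1) 0
      ((PySem.Set.ofList (pvL st)).map (fun t => (((pvL st).count t : Int), t)))
      = (pvF st).foldl max 0 := by
    rw [← hmapfst]; simp [List.foldl_map]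
  have e2 : List.foldl (fun (b : Int) (i : Int × String) => min b i.1) 9999999999999999
      ((PySem.Set.ofList (pvL st)).map (fun t => (((pvL st).count t : Int), t)))
      = (pvF st).foldl min 9999999999999999 := by
    rw [← hmapfst]; simp [List.foldl_map]
  have e3 : ∀ K : Int, List.foldl (fun (n : Int) (i : Int × String) => if i.1 = K then n + 1 else n) 0
      ((PySem.Set.ofList (pvL st)).map (fun t => (((pvL st).count t : Int), t)))
      = ((pvF st).count K : Int) := by
    intro K
    rw [← hmapfst, ← count_foldl]; simp [List.foldl_map]; rfl
  simp only [trending, hL, hdb]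
  rw [PySem.List.foldl_prod_mk (fun a (i : Int × String) => if a < i.1 then i.1 else a)
       (fun b (i : Int × String) => if i.1 < b then i.1 else b)]
  rw [show (fun (a : Int) (i : Int × String) => if a < i.1 then i.1 else a)
        = (fun a i => max a i.1) from funext fun a => funext fun i => if_lt_eq_max a i.1,
      show (fun (b : Int) (i : Int × String) => if i.1 < b then i.1 else b)
        = (fun b i => min b i.1) from funext fun b => funext fun i => if_lt_eq_min b i.1]
  rw [e1, e2]
  rw [PySem.List.foldl_prod_mk
        (fun n (i : Int × String) => if i.1 = (pvF st).foldl max 0 then n + 1 else n)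
        (fun n (i : Int × String) => if i.1 = (pvF st).foldl min 9999999999999999 then n + 1 else n)]
  rw [e3, e3]

theorem nest_fold (l : List (List String)) (d : PySem.Dict String Int) :
    l.foldl (fun d subj => (PySem.Set.ofList subj).foldl
        (fun d t => d.insert t (d.getD t 0 + 1)) d) d
      = (l.flatMap (fun x => PySem.Set.ofList x)).foldl
        (fun d t => d.insert t (d.getD t 0 + 1)) d := by
  induction l generalizing d with
  | nil => rfl
  | cons x tl ih => simp [List.flatMap_cons, List.foldl_append, ih]

theorem counts_eq (st : List (List String)) :
    st.foldl (fun d subj => (PySem.Set.ofList subj).foldl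
        (fun d t => d.insert t (d.getD t 0 + 1)) d) PySem.Dict.empty
      = PySem.Dict.counter (pvL st) := by
  rw [nest_fold]
  exact PySem.Dict.foldl_insert_getD_add_one_eq_counter (pvL st)

theorem count_flat_le (l : List (List String)) (t : String) :
    (l.flatMap (fun x => PySem.Set.ofList x)).count t ≤ l.length := by
  induction l with
  | nil => simp
  | cons x tl ih =>
    have h1 : (PySem.Set.ofList x).count t ≤ 1 :=
      List.nodup_iff_count_le_one.mp (PySem.Set.nodup_ofList x) t
    simp only [List.flatMap_cons, List.count_append, List.length_cons]
    omega

theorem F_mem (st : List (List String)) {c : Int} (hc : c ∈ pvF st) :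
    1 ≤ c ∧ c ≤ (st.length : Int) := by
  obtain ⟨t, ht, rfl⟩ := List.mem_map.mp hc
  have htL : t ∈ pvL st := (PySem.Set.mem_ofList _ _).mp ht
  have h1 : 0 < (pvL st).count t := List.count_pos_iff.mpr htL
  have h2 : (pvL st).count t ≤ st.length := count_flat_le st t
  constructor <;> [exact_mod_cast h1; exact_mod_cast h2]

-- in a ≤-sorted list the last element is an upper bound
theorem pairwise_le_getLast {l : List Int} (hp : l.Pairwise (· ≤ ·)) (h : l ≠ []) :
    ∀ y ∈ l, y ≤ l.getLast h := by
  induction l with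
  | nil => simp at h
  | cons a t ih =>
    intro y hy
    cases t with
    | nil => simp at hy; simp [hy]
    | cons b u =>
      have hp' := hp
      rw [List.pairwise_cons] at hp'
      have hlast : (a :: b :: u).getLast h = (b :: u).getLast (by simp) :=
        List.getLast_cons (by simp)
      rw [hlast]
      rcases List.mem_cons.mp hy with rfl | hy'
      · exact hp'.1 _ (List.getLast_mem _)
      · exact ih hp'.2 (by simp) y hy'

-- in a ≤-sorted nonempty list the head is a lower bound
theorem pairwise_le_head {a : Int} {t : List Int} (hp : (a :: t).Pairwise (· ≤ ·)) :
    ∀ y ∈ a :: t, a ≤ y := by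
  rw [List.pairwise_cons] at hp
  intro y hy
  rcases List.mem_cons.mp hy with rfl | hy'
  · exact le_refl _
  · exact hp.1 _ hy'

theorem B_characterize (st : List (List String)) (h : pvL st ≠ []) :
    ∃ m m', (m ∈ pvF st ∧ ∀ y ∈ pvF st, y ≤ m) ∧
      (m' ∈ pvF st ∧ ∀ y ∈ pvF st, m' ≤ y) ∧
      trending_alt st = [((pvF st).count m : Int), ((pvF st).count m' : Int)] := by
  have hvals : (st.foldl (fun d subj => (PySem.Set.ofList subj).foldl
        (fun d t => d.insert t (d.getD t 0 + 1)) d) PySem.Dict.empty).values = pvF st := by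
    rw [counts_eq]
    simp [PySem.Dict.values, PySem.Dict.items_counter, List.map_map, Function.comp, pvF]
  have hS : PySem.Set.ofList (pvL st) ≠ [] := by
    obtain ⟨x, hx⟩ := List.exists_mem_of_ne_nil (pvL st) h
    exact List.ne_nil_of_mem ((PySem.Set.mem_ofList _ x).mpr hx)
  have hFne : pvF st ≠ [] := by
    simpa [pvF, List.map_eq_nil_iff] using hS
  have hperm : (PySem.List.sorted (pvF st) (fun x => x) false).Perm (pvF st) :=
    PySem.List.sorted_perm _ _ _
  have hfne : PySem.List.sorted (pvF st) (fun x => x) false ≠ [] := by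
    intro h0; exact hFne ((PySem.List.sorted_eq_nil_iff _ _ _).mp h0)
  have hpw : (PySem.List.sorted (pvF st) (fun x => x) false).Pairwise (· ≤ ·) := by
    simpa using PySem.List.sorted_pairwise (pvF st) (fun x => x)
  set f := PySem.List.sorted (pvF st) (fun x => x) false with hf
  obtain ⟨a, t, hcons⟩ := List.exists_cons_of_ne_nil hfne
  refine ⟨f.getLast hfne, a, ?_, ?_, ?_⟩
  · refine ⟨hperm.mem_iff.mp (List.getLast_mem hfne), fun y hy => ?_⟩
    exact pairwise_le_getLast hpw hfne y (hperm.mem_iff.mpr hy)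
  · refine ⟨hperm.mem_iff.mp (by simp [hcons]), fun y hy => ?_⟩
    have := pairwise_le_head (hcons ▸ hpw) y (hcons ▸ hperm.mem_iff.mpr hy)
    exact this
  · have hempty : f.isEmpty = false := by simp [hfne]
    have hneg1 : PySem.List.pyGetD f (-1) 0 = f.getLast hfne :=
      PySem.List.pyGetD_neg_one f 0 hfne
    have hzero : PySem.List.pyGetD f 0 0 = a := by
      rw [hcons]; exact PySem.List.pyGetD_zero_cons a t 0
    simp only [trending_alt, hvals, ← hf, hempty, Bool.false_eq_true, if_false,
      hneg1, hzero]
    rw [hperm.count_eq, hperm.count_eq]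

theorem AB_eq (st : List (List String)) (hpre : (st.length : Int) ≤ 9999999999999999) :
    trending st = trending_alt st := by
  by_cases h : pvL st = []
  · have hA : trending st = [0, 0] := by
      rw [A_characterize]
      simp [pvF, h, PySem.Set.ofList]
    have hB : trending_alt st = [0, 0] := by
      have hvals : (st.foldl (fun d subj => (PySem.Set.ofList subj).foldl
            (fun d t => d.insert t (d.getD t 0 + 1)) d) PySem.Dict.empty).values = pvF st := by
        rw [counts_eq]
        simp [PySem.Dict.values, PySem.Dict.items_counter, List.map_map, Function.comp, pvF]
      have hFnil : pvF st = [] := by simp [pvF, h, PySem.Set.ofList]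
      simp [trending_alt, hvals, hFnil, PySem.List.sorted]
    rw [hA, hB]
  · obtain ⟨m, m', ⟨hmF, hub⟩, ⟨hm'F, hlb⟩, hB⟩ := B_characterize st h
    have hmax : (pvF st).foldl max 0 = m := by
      have h2 := (PySem.List.le_foldl_max (pvF st) 0).2
      rcases PySem.List.foldl_max_mem (pvF st) 0 with h0 | hmem
      · have := h2 m hmF
        have := (F_mem st hmF).1
        omega
      · exact le_antisymm (hub _ hmem) (h2 m hmF)
    have hmin : (pvF st).foldl min 9999999999999999 = m' := by
      have h2 := (PySem.List.foldl_min_le (pvF st) 9999999999999999).2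
      rcases PySem.List.foldl_min_mem (pvF st) 9999999999999999 with h0 | hmem
      · have hle := h2 m' hm'F
        have hb := (F_mem st hm'F).2
        omega
      · exact le_antisymm (h2 m' hm'F) (hlb _ hmem)
    rw [A_characterize, hB, hmax, hmin]

-- ===== VERDICT (by name: the statement is the Claim_ definition above) =====
theorem trending_spec : Claim_equal_trending := by
  intro st _ hpre
  unfold Pre_trending at hpre
  unfold Spec_trending
  exact AB_eq st hpre
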